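-- pv_equiv track=rewrite | github.com/TheSirLancelot/aoc2024 | 13/1/solve.py | find_cheapest
-- ===== SOURCE A (Python) =====
-- from itertools import product
--
-- def find_cheapest(buttons, prize, max_presses=100):
--     # they hinted that you don't have to press more than 100 so we're using that for now
--     a_x, a_y, a_cost = buttons[0]  # Button A configuration
--     b_x, b_y, b_cost = buttons[1]  # Button B configuration
--     target_x, target_y = prize
--
--     min_cost = float("inf")  # infinity
--
--     for a_presses, b_presses in product(range(max_presses + 1), repeat=2):
--         # calculate the final position after pressing buttons
--         total_x = a_presses * a_x + b_presses * b_x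
--         total_y = a_presses * a_y + b_presses * b_y
--
--         # see if it matches our prize location
--         if total_x == target_x and total_y == target_y:
--             # figure out how much it costs
--             cost = a_presses * a_cost + b_presses * b_cost
--             min_cost = min(min_cost, cost)
--
--     return min_cost if min_cost != float("inf") else None
-- ===== SOURCE B (Python) =====
-- def find_cheapest(buttons, prize, max_presses=100):
--     a_x, a_y, a_cost = buttons[0]
--     b_x, b_y, b_cost = buttons[1]
--     target_x, target_y = prize
--
--     det = a_x * b_y - a_y * b_x
--     if det != 0:
--         # unique candidate by Cramer's rule
--         num_a = target_x * b_y - target_y * b_x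
--         num_b = a_x * target_y - a_y * target_x
--         if num_a % det == 0 and num_b % det == 0:
--             a = num_a // det
--             b = num_b // det
--             if 0 <= a <= max_presses and 0 <= b <= max_presses:
--                 return a * a_cost + b * b_cost
--         return None
--
--     # degenerate (collinear) case: scan a, pick the best b for each a
--     best = None
--     for a in range(max_presses + 1):
--         rx = target_x - a * a_x
--         ry = target_y - a * a_y
--         if b_x == 0 and b_y == 0:
--             if rx != 0 or ry != 0:
--                 continue
--             b = 0 if b_cost >= 0 else max_presses
--         elif b_x != 0:
--             if rx % b_x != 0:
--                 continue
--             b = rx // b_x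
--             if b * b_y != ry or not (0 <= b <= max_presses):
--                 continue
--         else:
--             if rx != 0 or ry % b_y != 0:
--                 continue
--             b = ry // b_y
--             if not (0 <= b <= max_presses):
--                 continue
--         cost = a * a_cost + b * b_cost
--         if best is None or cost < best:
--             best = cost
--     return best
-- ===== Notes on version B (the rewrite author's own statement) =====
-- stated objective: faster
-- what changed: Replaced A's exhaustive O(max_presses^2) double loop over all press pairs with Cramer's rule (constant-time unique-solution check when the button determinant is nonzero) plus a single linear scan over a-presses only in the degenerate det=0 case.
import Mathlib
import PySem

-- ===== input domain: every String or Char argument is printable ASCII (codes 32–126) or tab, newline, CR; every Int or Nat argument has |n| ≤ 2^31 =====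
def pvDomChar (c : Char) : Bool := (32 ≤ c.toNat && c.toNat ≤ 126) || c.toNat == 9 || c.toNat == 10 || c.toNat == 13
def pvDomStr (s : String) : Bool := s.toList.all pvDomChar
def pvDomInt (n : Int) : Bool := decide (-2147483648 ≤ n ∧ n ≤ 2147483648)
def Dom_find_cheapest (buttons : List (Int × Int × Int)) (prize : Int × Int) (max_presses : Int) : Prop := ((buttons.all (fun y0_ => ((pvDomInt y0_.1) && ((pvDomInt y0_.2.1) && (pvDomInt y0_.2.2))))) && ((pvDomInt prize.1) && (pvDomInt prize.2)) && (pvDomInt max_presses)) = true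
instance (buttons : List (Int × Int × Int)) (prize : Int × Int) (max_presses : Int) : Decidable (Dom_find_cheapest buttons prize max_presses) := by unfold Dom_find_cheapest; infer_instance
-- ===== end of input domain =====

-- B replaces A's O(max_presses^2) brute-force double loop by Cramer's rule (O(1) when the
-- button determinant is nonzero) with a single O(max_presses) scan only in the degenerate
-- det = 0 case; equivalence of the RETURN value is proved on lists with at least 2 buttons.

-- ===== PORT A =====
def find_cheapest (buttons : List (Int × Int × Int)) (prize : Int × Int) (max_presses : Int) : Option Int :=
  match PySem.List.pyGet? buttons 0, PySem.List.pyGet? buttons 1 with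
  | some (a_x, a_y, a_cost), some (b_x, b_y, b_cost) =>
    let target_x := prize.1
    let target_y := prize.2
    -- min_cost = float("inf") modelled as `none`; a found cost is `some c`
    let r := PySem.List.pyRange 0 (max_presses + 1) 1
    r.foldl (fun min_cost a_presses =>
      r.foldl (fun min_cost b_presses =>
        let total_x := a_presses * a_x + b_presses * b_x
        let total_y := a_presses * a_y + b_presses * b_y
        if total_x = target_x ∧ total_y = target_y then
          let cost := a_presses * a_cost + b_presses * b_cost
          some (match min_cost with | none => cost | some m => min m cost)
        else min_cost) min_cost) none
  | _, _ => none  -- unreachable under Pre_ (Python raises IndexError)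

-- ===== PORT B =====
def find_cheapest_alt (buttons : List (Int × Int × Int)) (prize : Int × Int) (max_presses : Int) : Option Int :=
  match buttons with
  | (a_x, a_y, a_cost) :: (b_x, b_y, b_cost) :: _ =>
    let target_x := prize.1
    let target_y := prize.2
    let det := a_x * b_y - a_y * b_x
    if det ≠ 0 then
      -- unique candidate by Cramer's rule
      let num_a := target_x * b_y - target_y * b_x
      let num_b := a_x * target_y - a_y * target_x
      if PySem.Int.mod num_a det = 0 ∧ PySem.Int.mod num_b det = 0 then
        let a := PySem.Int.floordiv num_a det
        let b := PySem.Int.floordiv num_b det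
        if 0 ≤ a ∧ a ≤ max_presses ∧ 0 ≤ b ∧ b ≤ max_presses then
          some (a * a_cost + b * b_cost)
        else none
      else none
    else
      -- degenerate (collinear) case: scan a, pick the best b for each a
      (PySem.List.pyRange 0 (max_presses + 1) 1).foldl (fun best a =>
        let rx := target_x - a * a_x
        let ry := target_y - a * a_y
        let cand : Option Int :=
          if b_x = 0 ∧ b_y = 0 then
            if rx = 0 ∧ ry = 0 then some (if 0 ≤ b_cost then 0 else max_presses) else none
          else if b_x ≠ 0 then
            if PySem.Int.mod rx b_x = 0 then
              let b := PySem.Int.floordiv rx b_x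
              if b * b_y = ry ∧ 0 ≤ b ∧ b ≤ max_presses then some b else none
            else none
          else
            if rx = 0 ∧ PySem.Int.mod ry b_y = 0 then
              let b := PySem.Int.floordiv ry b_y
              if 0 ≤ b ∧ b ≤ max_presses then some b else none
            else none
        match cand with
        | none => best
        | some b =>
          let cost := a * a_cost + b * b_cost
          match best with
          | none => some cost
          | some m => if cost < m then some cost else some m) none
  | _ => none

-- ===== PRECONDITION & SPEC =====
-- Pre_ excludes lists with fewer than two buttons, on which Python A raises IndexError.
def Pre_find_cheapest (buttons : List (Int × Int × Int)) (prize : Int × Int) (max_presses : Int) : Prop :=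
  2 ≤ buttons.length
instance (buttons : List (Int × Int × Int)) (prize : Int × Int) (max_presses : Int) : Decidable (Pre_find_cheapest buttons prize max_presses) := by unfold Pre_find_cheapest; infer_instance

def pvWitness_find_cheapest : (List (Int × Int × Int)) × (Int × Int) × Int :=
  ([(2, 1, 3), (1, 2, 1)], (5, 4), 100)

def Spec_find_cheapest (buttons : List (Int × Int × Int)) (prize : Int × Int) (max_presses : Int) (out : Option Int) : Prop := out = find_cheapest_alt buttons prize max_presses
instance (buttons : List (Int × Int × Int)) (prize : Int × Int) (max_presses : Int) (out : Option Int) : Decidable (Spec_find_cheapest buttons prize max_presses out) := by unfold Spec_find_cheapest; infer_instance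

-- ===== CLAIM (what is proved, stated in full; the proofs are below) =====
def Claim_equal_find_cheapest : Prop := ∀ (buttons : List (Int × Int × Int)) (prize : Int × Int) (max_presses : Int), Dom_find_cheapest buttons prize max_presses → Pre_find_cheapest buttons prize max_presses → Spec_find_cheapest buttons prize max_presses (find_cheapest buttons prize max_presses)

-- ===== LEMMAS AND PROOFS =====

-- running minimum on Option Int (none = "infinity")
def pmin (acc : Option Int) (c : Int) : Option Int :=
  match acc with | none => some c | some m => some (min m c)

theorem foldl_pmin_some (l : List Int) (x : Int) :
    l.foldl pmin (some x) = some (l.foldl min x) := by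
  induction l generalizing x with
  | nil => rfl
  | cons h t ih => simp [pmin, ih]

theorem foldl_pmin_none_eq_min? (l : List Int) :
    l.foldl pmin none = l.min? := by
  cases l with
  | nil => rfl
  | cons h t => simp [List.min?, pmin, foldl_pmin_some]

theorem foldl_optstep (g : Int → Option Int) (step : Option Int → Int → Option Int)
    (hstep : ∀ acc x, step acc x = match g x with | none => acc | some c => pmin acc c)
    (l : List Int) (acc : Option Int) :
    l.foldl step acc = (l.filterMap g).foldl pmin acc := by
  induction l generalizing acc with
  | nil => rfl
  | cons h t ih =>
    simp only [List.foldl_cons, List.filterMap_cons, hstep]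
    cases g h <;> simp [ih]

theorem foldl_nested_pmin (f : Int → Int → Option Int) (l₁ l₂ : List Int) (acc : Option Int) :
    l₁.foldl (fun acc a => (l₂.filterMap (f a)).foldl pmin acc) acc
      = (l₁.flatMap (fun a => l₂.filterMap (f a))).foldl pmin acc := by
  induction l₁ generalizing acc with
  | nil => rfl
  | cons h t ih => simp only [List.foldl_cons, List.flatMap_cons, List.foldl_append, ih]

-- min? only depends on membership up to domination
theorem min?_ext (l₁ l₂ : List Int)
    (hsub : ∀ x, x ∈ l₂ → x ∈ l₁)
    (hdom : ∀ x, x ∈ l₁ → ∃ y ∈ l₂, y ≤ x) :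
    l₁.min? = l₂.min? := by
  cases h1 : l₁.min? with
  | none =>
    rw [List.min?_eq_none_iff] at h1
    symm
    rw [List.min?_eq_none_iff]
    cases hl2 : l₂ with
    | nil => rfl
    | cons a t =>
      exfalso
      have := hsub a (by rw [hl2]; simp)
      rw [h1] at this
      simp at this
  | some μ =>
    rw [List.min?_eq_some_iff] at h1
    obtain ⟨hmem, hle⟩ := h1
    obtain ⟨y, hy, hyle⟩ := hdom μ hmem
    have hle2 : μ ≤ y := hle y (hsub y hy)
    have hyμ : y = μ := le_antisymm hyle hle2
    subst hyμ
    symm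
    rw [List.min?_eq_some_iff]
    exact ⟨hy, fun b hb => hle b (hsub b hb)⟩

-- the multiset of costs A minimises over
def cands (ax ay ac bx bY bc tx ty m : Int) : List Int :=
  (PySem.List.pyRange 0 (m + 1) 1).flatMap (fun a =>
    (PySem.List.pyRange 0 (m + 1) 1).filterMap (fun b =>
      if a * ax + b * bx = tx ∧ a * ay + b * bY = ty then some (a * ac + b * bc) else none))

theorem mem_cands (ax ay ac bx bY bc tx ty m x : Int) :
    x ∈ cands ax ay ac bx bY bc tx ty m ↔
      ∃ a b, (0 ≤ a ∧ a ≤ m) ∧ (0 ≤ b ∧ b ≤ m) ∧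
        a * ax + b * bx = tx ∧ a * ay + b * bY = ty ∧ x = a * ac + b * bc := by
  simp only [cands, List.mem_flatMap, List.mem_filterMap, PySem.List.mem_pyRange_one,
    Option.ite_none_right_eq_some, Option.some.injEq]
  constructor
  · rintro ⟨a, ⟨ha0, ha1⟩, b, ⟨hb0, hb1⟩, ⟨he1, he2⟩, hx⟩
    exact ⟨a, b, ⟨ha0, by omega⟩, ⟨hb0, by omega⟩, he1, he2, hx.symm⟩
  · rintro ⟨a, b, ⟨ha0, ha1⟩, ⟨hb0, hb1⟩, he1, he2, hx⟩
    exact ⟨a, ⟨ha0, by omega⟩, b, ⟨hb0, by omega⟩, ⟨he1, he2⟩, hx.symm⟩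

theorem find_cheapest_eq_min?_cands (ax ay ac bx bY bc : Int) (rest : List (Int × Int × Int))
    (tx ty m : Int) :
    find_cheapest ((ax, ay, ac) :: (bx, bY, bc) :: rest) (tx, ty) m
      = (cands ax ay ac bx bY bc tx ty m).min? := by
  have h0 : PySem.List.pyGet? ((ax, ay, ac) :: (bx, bY, bc) :: rest) (0 : Int)
      = some (ax, ay, ac) := by simp [pysem]
  have h1 : PySem.List.pyGet? ((ax, ay, ac) :: (bx, bY, bc) :: rest) (1 : Int)
      = some (bx, bY, bc) := by simp [pysem]
  unfold find_cheapest
  rw [h0, h1]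
  show (PySem.List.pyRange 0 (m + 1) 1).foldl _ none = _
  rw [show (fun (min_cost : Option Int) (a_presses : Int) =>
      (PySem.List.pyRange 0 (m + 1) 1).foldl (fun min_cost b_presses =>
        let total_x := a_presses * ax + b_presses * bx
        let total_y := a_presses * ay + b_presses * bY
        if total_x = tx ∧ total_y = ty then
          let cost := a_presses * ac + b_presses * bc
          some (match min_cost with | none => cost | some mi => min mi cost)
        else min_cost) min_cost)
    = (fun (acc : Option Int) (a : Int) =>
      ((PySem.List.pyRange 0 (m + 1) 1).filterMap (fun b =>
        if a * ax + b * bx = tx ∧ a * ay + b * bY = ty then some (a * ac + b * bc) else none)).foldl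
        pmin acc) from by
      funext acc a
      rw [foldl_optstep (fun b =>
        if a * ax + b * bx = tx ∧ a * ay + b * bY = ty then some (a * ac + b * bc) else none)]
      intro acc' b
      by_cases h : a * ax + b * bx = tx ∧ a * ay + b * bY = ty <;>
        cases acc' <;> simp [h, pmin]]
  rw [foldl_nested_pmin, foldl_pmin_none_eq_min?]
  rfl

-- Cramer identities: on a solution, a·det = num_a and b·det = num_b
theorem cramer_a (ax ay bx bY tx ty a b : Int)
    (h1 : a * ax + b * bx = tx) (h2 : a * ay + b * bY = ty) :
    a * (ax * bY - ay * bx) = tx * bY - ty * bx := by linear_combination bY * h1 - bx * h2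

theorem cramer_b (ax ay bx bY tx ty a b : Int)
    (h1 : a * ax + b * bx = tx) (h2 : a * ay + b * bY = ty) :
    b * (ax * bY - ay * bx) = ax * ty - ay * tx := by linear_combination ax * h2 - ay * h1

-- exact division: if q·d = n and d ≠ 0 then n // d = q and n % d = 0
theorem floordiv_exact (n d q : Int) (hd : d ≠ 0) (h : q * d = n) :
    PySem.Int.floordiv n d = q ∧ PySem.Int.mod n d = 0 := by
  have hdvd : d ∣ n := ⟨q, by linarith [h]⟩
  have hmod : PySem.Int.mod n d = 0 := (PySem.Int.mod_eq_zero_iff_dvd n d).mpr hdvd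
  have h2 := PySem.Int.floordiv_mul_add_mod n d
  rw [hmod, add_zero] at h2
  have h3 : PySem.Int.floordiv n d * d = q * d := by rw [h2, h]
  exact ⟨mul_right_cancel₀ hd h3, hmod⟩

-- det ≠ 0, Cramer solution integral: cands is empty or the singleton of its cost
theorem min?_cands_dvd (ax ay ac bx bY bc tx ty m a b : Int)
    (hdet : ax * bY - ay * bx ≠ 0)
    (hna : a * (ax * bY - ay * bx) = tx * bY - ty * bx)
    (hnb : b * (ax * bY - ay * bx) = ax * ty - ay * tx) :
    (cands ax ay ac bx bY bc tx ty m).min? =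
      if 0 ≤ a ∧ a ≤ m ∧ 0 ≤ b ∧ b ≤ m then some (a * ac + b * bc) else none := by
  have he1 : a * ax + b * bx = tx := by
    have h : (a * ax + b * bx) * (ax * bY - ay * bx) = tx * (ax * bY - ay * bx) := by
      linear_combination ax * hna + bx * hnb
    exact mul_right_cancel₀ hdet h
  have he2 : a * ay + b * bY = ty := by
    have h : (a * ay + b * bY) * (ax * bY - ay * bx) = ty * (ax * bY - ay * bx) := by
      linear_combination ay * hna + bY * hnb
    exact mul_right_cancel₀ hdet h
  have huniq : ∀ x ∈ cands ax ay ac bx bY bc tx ty m,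
      (0 ≤ a ∧ a ≤ m ∧ 0 ≤ b ∧ b ≤ m) ∧ x = a * ac + b * bc := by
    intro x hx
    rw [mem_cands] at hx
    obtain ⟨a', b', ⟨ha0, ha1⟩, ⟨hb0, hb1⟩, he1', he2', hx⟩ := hx
    have ha : a' = a := mul_right_cancel₀ hdet
      ((cramer_a ax ay bx bY tx ty a' b' he1' he2').trans hna.symm)
    have hb : b' = b := mul_right_cancel₀ hdet
      ((cramer_b ax ay bx bY tx ty a' b' he1' he2').trans hnb.symm)
    subst ha hb
    exact ⟨⟨ha0, ha1, hb0, hb1⟩, hx⟩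
  by_cases hbounds : 0 ≤ a ∧ a ≤ m ∧ 0 ≤ b ∧ b ≤ m
  · rw [if_pos hbounds, List.min?_eq_some_iff]
    constructor
    · rw [mem_cands]
      exact ⟨a, b, ⟨hbounds.1, hbounds.2.1⟩, ⟨hbounds.2.2.1, hbounds.2.2.2⟩, he1, he2, rfl⟩
    · intro y hy
      rw [(huniq y hy).2]
  · rw [if_neg hbounds, List.min?_eq_none_iff, List.eq_nil_iff_forall_not_mem]
    intro x hx
    exact hbounds (huniq x hx).1

-- det ≠ 0, Cramer solution not integral: cands is empty
theorem min?_cands_nodvd (ax ay ac bx bY bc tx ty m : Int)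
    (hdet : ax * bY - ay * bx ≠ 0)
    (hnd : ¬(PySem.Int.mod (tx * bY - ty * bx) (ax * bY - ay * bx) = 0 ∧
             PySem.Int.mod (ax * ty - ay * tx) (ax * bY - ay * bx) = 0)) :
    (cands ax ay ac bx bY bc tx ty m).min? = none := by
  rw [List.min?_eq_none_iff, List.eq_nil_iff_forall_not_mem]
  intro x hx
  rw [mem_cands] at hx
  obtain ⟨a, b, _, _, he1, he2, _⟩ := hx
  exact hnd ⟨(floordiv_exact _ _ _ hdet (cramer_a ax ay bx bY tx ty a b he1 he2)).2,
             (floordiv_exact _ _ _ hdet (cramer_b ax ay bx bY tx ty a b he1 he2)).2⟩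

-- per-a best-b candidate used by B's degenerate scan
def candB (ax ay bx bY bc tx ty m a : Int) : Option Int :=
  let rx := tx - a * ax
  let ry := ty - a * ay
  if bx = 0 ∧ bY = 0 then
    if rx = 0 ∧ ry = 0 then some (if 0 ≤ bc then 0 else m) else none
  else if bx ≠ 0 then
    if PySem.Int.mod rx bx = 0 then
      let b := PySem.Int.floordiv rx bx
      if b * bY = ry ∧ 0 ≤ b ∧ b ≤ m then some b else none
    else none
  else
    if rx = 0 ∧ PySem.Int.mod ry bY = 0 then
      let b := PySem.Int.floordiv ry bY
      if 0 ≤ b ∧ b ≤ m then some b else none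
    else none

def cands2 (ax ay ac bx bY bc tx ty m : Int) : List Int :=
  (PySem.List.pyRange 0 (m + 1) 1).filterMap (fun a =>
    (candB ax ay bx bY bc tx ty m a).map (fun b => a * ac + b * bc))

-- B's degenerate scan computes min? of cands2
theorem scan_eq_min?_cands2 (ax ay ac bx bY bc tx ty m : Int) :
    (PySem.List.pyRange 0 (m + 1) 1).foldl (fun best a =>
        let rx := tx - a * ax
        let ry := ty - a * ay
        let cand : Option Int :=
          if bx = 0 ∧ bY = 0 then
            if rx = 0 ∧ ry = 0 then some (if 0 ≤ bc then 0 else m) else none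
          else if bx ≠ 0 then
            if PySem.Int.mod rx bx = 0 then
              let b := PySem.Int.floordiv rx bx
              if b * bY = ry ∧ 0 ≤ b ∧ b ≤ m then some b else none
            else none
          else
            if rx = 0 ∧ PySem.Int.mod ry bY = 0 then
              let b := PySem.Int.floordiv ry bY
              if 0 ≤ b ∧ b ≤ m then some b else none
            else none
        match cand with
        | none => best
        | some b =>
          let cost := a * ac + b * bc
          match best with
          | none => some cost
          | some mi => if cost < mi then some cost else some mi) none
      = (cands2 ax ay ac bx bY bc tx ty m).min? := by
  rw [← foldl_pmin_none_eq_min?, cands2]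
  apply foldl_optstep
  intro acc a
  show (match candB ax ay bx bY bc tx ty m a with
        | none => acc
        | some b =>
          match acc with
          | none => some (a * ac + b * bc)
          | some mi => if a * ac + b * bc < mi then some (a * ac + b * bc) else some mi) = _
  cases candB ax ay bx bY bc tx ty m a with
  | none => rfl
  | some b =>
    cases acc with
    | none => rfl
    | some mi =>
      simp only [Option.map_some, pmin]
      by_cases h : a * ac + b * bc < mi
      · simp [h, min_eq_right (by omega : a * ac + b * bc ≤ mi)]
      · simp [h, min_eq_left (by omega : mi ≤ a * ac + b * bc)]

-- soundness of candB: a kept candidate is a genuine solution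
theorem candB_sound (ax ay bx bY bc tx ty m a b : Int) (hm : 0 ≤ m)
    (hc : candB ax ay bx bY bc tx ty m a = some b) :
    (0 ≤ b ∧ b ≤ m) ∧ a * ax + b * bx = tx ∧ a * ay + b * bY = ty := by
  unfold candB at hc
  by_cases h0 : bx = 0 ∧ bY = 0
  · rw [if_pos h0] at hc
    by_cases h1 : tx - a * ax = 0 ∧ ty - a * ay = 0
    · rw [if_pos h1] at hc
      have hb : (if 0 ≤ bc then (0 : Int) else m) = b := by simpa using hc
      obtain ⟨hbx, hby⟩ := h0
      subst hbx hby
      refine ⟨?_, by linarith [h1.1], by linarith [h1.2]⟩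
      rw [← hb]; constructor <;> (split_ifs <;> omega)
    · rw [if_neg h1] at hc; simp at hc
  · rw [if_neg h0] at hc
    by_cases h2 : bx ≠ 0
    · rw [if_pos h2] at hc
      by_cases h3 : PySem.Int.mod (tx - a * ax) bx = 0
      · rw [if_pos h3] at hc
        simp only [Option.ite_none_right_eq_some, Option.some.injEq] at hc
        obtain ⟨⟨hby, hb0, hb1⟩, hb⟩ := hc
        subst hb
        have h4 := PySem.Int.floordiv_mul_add_mod (tx - a * ax) bx
        rw [h3, add_zero] at h4
        exact ⟨⟨hb0, hb1⟩, by linarith [h4], by linarith [hby]⟩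
      · rw [if_neg h3] at hc; simp at hc
    · push_neg at h2
      rw [if_neg (by simp [h2] : ¬bx ≠ 0)] at hc
      have hbY : bY ≠ 0 := fun h => h0 ⟨h2, h⟩
      by_cases h5 : tx - a * ax = 0 ∧ PySem.Int.mod (ty - a * ay) bY = 0
      · rw [if_pos h5] at hc
        simp only [Option.ite_none_right_eq_some, Option.some.injEq] at hc
        obtain ⟨⟨hb0, hb1⟩, hb⟩ := hc
        subst hb
        have h6 := PySem.Int.floordiv_mul_add_mod (ty - a * ay) bY
        rw [h5.2, add_zero] at h6
        exact ⟨⟨hb0, hb1⟩, by rw [h2]; linarith [h5.1], by linarith [h6]⟩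
      · rw [if_neg h5] at hc; simp at hc

-- completeness: for any genuine solution (a, b), candB keeps a b' with cost ≤
theorem candB_complete (ax ay bx bY bc tx ty m a b : Int)
    (hb0 : 0 ≤ b) (hb1 : b ≤ m)
    (he1 : a * ax + b * bx = tx) (he2 : a * ay + b * bY = ty) :
    ∃ b', candB ax ay bx bY bc tx ty m a = some b' ∧ b' * bc ≤ b * bc := by
  unfold candB
  by_cases h0 : bx = 0 ∧ bY = 0
  · obtain ⟨hbx, hby⟩ := h0
    subst hbx hby
    have hrx : tx - a * ax = 0 := by linarith [he1]
    have hry : ty - a * ay = 0 := by linarith [he2]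
    refine ⟨if 0 ≤ bc then 0 else m, by simp [hrx, hry], ?_⟩
    split_ifs with hbc
    · simpa using mul_nonneg hb0 hbc
    · exact mul_le_mul_of_nonpos_right hb1 (by omega)
  · by_cases h2 : bx ≠ 0
    · have hrb : b * bx = tx - a * ax := by linarith [he1]
      obtain ⟨hdiv, hmod⟩ := floordiv_exact _ _ _ h2 hrb
      have hby : b * bY = ty - a * ay := by linarith [he2]
      refine ⟨b, ?_, le_refl _⟩
      rw [if_neg h0, if_pos h2, if_pos hmod]
      simp [hdiv, hby, hb0, hb1]
    · push_neg at h2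
      have hbY : bY ≠ 0 := fun h => h0 ⟨h2, h⟩
      have hrx : tx - a * ax = 0 := by rw [← he1, h2]; ring_nf
      have hrb : b * bY = ty - a * ay := by linarith [he2]
      obtain ⟨hdiv, hmod⟩ := floordiv_exact _ _ _ hbY hrb
      refine ⟨b, ?_, le_refl _⟩
      rw [if_neg h0, if_neg (by simp [h2] : ¬bx ≠ 0), if_pos ⟨hrx, hmod⟩]
      simp [hdiv, hb0, hb1]

-- det = 0 case: cands and cands2 have the same min?
theorem min?_cands2_eq (ax ay ac bx bY bc tx ty m : Int) :
    (cands ax ay ac bx bY bc tx ty m).min? = (cands2 ax ay ac bx bY bc tx ty m).min? := by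
  apply min?_ext
  · -- cands2 ⊆ cands
    intro x hx
    simp only [cands2, List.mem_filterMap, Option.map_eq_some_iff,
      PySem.List.mem_pyRange_one] at hx
    obtain ⟨a, ⟨ha0, ha1⟩, b, hc, hx⟩ := hx
    obtain ⟨⟨hbb0, hbb1⟩, he1, he2⟩ := candB_sound ax ay bx bY bc tx ty m a b (by omega) hc
    rw [mem_cands]
    exact ⟨a, b, ⟨ha0, by omega⟩, ⟨hbb0, hbb1⟩, he1, he2, hx.symm⟩
  · -- every cands element is dominated by a cands2 element
    intro x hx
    rw [mem_cands] at hx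
    obtain ⟨a, b, ⟨ha0, ha1⟩, ⟨hb0, hb1⟩, he1, he2, hx⟩ := hx
    obtain ⟨b', hc, hle⟩ := candB_complete ax ay bx bY bc tx ty m a b hb0 hb1 he1 he2
    refine ⟨a * ac + b' * bc, ?_, by omega⟩
    simp only [cands2, List.mem_filterMap, PySem.List.mem_pyRange_one]
    exact ⟨a, ⟨ha0, by omega⟩, by rw [hc]; rfl⟩

-- ===== VERDICT (by name: the statement is the Claim_ definition above) =====
theorem find_cheapest_spec : Claim_equal_find_cheapest := by
  intro buttons prize m _ hpre
  unfold Spec_find_cheapest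
  match buttons, hpre with
  | (ax, ay, ac) :: (bx, bY, bc) :: rest, _ =>
    obtain ⟨tx, ty⟩ := prize
    have h0 : PySem.List.pyGet? ((ax, ay, ac) :: (bx, bY, bc) :: rest) (0 : Int)
        = some (ax, ay, ac) := by simp [pysem]
    have h1 : PySem.List.pyGet? ((ax, ay, ac) :: (bx, bY, bc) :: rest) (1 : Int)
        = some (bx, bY, bc) := by simp [pysem]
    rw [find_cheapest_eq_min?_cands]
    simp only [find_cheapest_alt]
    by_cases hdet : ax * bY - ay * bx = 0
    · rw [if_neg (not_not_intro hdet), min?_cands2_eq]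
      exact (scan_eq_min?_cands2 ax ay ac bx bY bc tx ty m).symm
    · rw [if_pos hdet]
      by_cases hmods : PySem.Int.mod (tx * bY - ty * bx) (ax * bY - ay * bx) = 0 ∧
          PySem.Int.mod (ax * ty - ay * tx) (ax * bY - ay * bx) = 0
      · rw [if_pos hmods]
        have hna := PySem.Int.floordiv_mul_add_mod (tx * bY - ty * bx) (ax * bY - ay * bx)
        have hnb := PySem.Int.floordiv_mul_add_mod (ax * ty - ay * tx) (ax * bY - ay * bx)
        rw [hmods.1, add_zero] at hna
        rw [hmods.2, add_zero] at hnb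
        exact min?_cands_dvd ax ay ac bx bY bc tx ty m _ _ hdet hna hnb
      · rw [if_neg hmods]
        exact min?_cands_nodvd ax ay ac bx bY bc tx ty m hdet hmods
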